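-- pv_equiv track=rewrite | github.com/lealsadeft2025/tabelass-sagrada-sadeft | app.py | construir_stats
-- ===== SOURCE A (Python) =====
-- def construir_stats(historico):
--     stats = {d: {'dz':d,'freq':0,'lastSeen':-1,'runs':0,'impulso':0} for d in range(1,26)}
--     for i,conc in enumerate(historico):
--         for d in conc:
--             if 1 <= d <= 25:
--                 stats[d]['freq'] += 1
--     # lastSeen
--     for d in range(1,26):
--         for i in range(len(historico)-1, -1, -1):
--             if d in historico[i]:
--                 stats[d]['lastSeen'] = len(historico)-1 - i
--                 break
--     # runs and impulso
--     for d in range(1,26):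
--         tl = [1 if d in c else 0 for c in historico]
--         runs = 0; cur = 0; impulso = 0
--         for i,v in enumerate(tl):
--             prev = tl[i-1] if i>0 else 0
--             if v==1 and prev==0: impulso+=1
--             if v==0 and prev==1: impulso-=1
--             if v==1 and prev==1: impulso+=2
--             if v==1: cur+=1
--             else:
--                 if cur>0: runs+=1; cur=0
--         if cur>0: runs+=1
--         stats[d]['runs']=runs; stats[d]['impulso']=impulso
--     return stats
-- ===== SOURCE B (Python) =====
-- def construir_stats(historico):
--     # One pass over historico builds, for each dozen, its multiplicity count and the
--     # list of concurso indices where it appears; each stat is then computed directly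
--     # from that compact index list instead of re-scanning historico 25 times.
--     n = len(historico)
--     freq = {d: 0 for d in range(1, 26)}
--     pos = {d: [] for d in range(1, 26)}
--     for i, conc in enumerate(historico):
--         seen = set()
--         for d in conc:
--             if 1 <= d <= 25:
--                 freq[d] += 1
--                 if d not in seen:
--                     seen.add(d)
--                     pos[d].append(i)
--     out = {}
--     for d in range(1, 26):
--         idx = pos[d]
--         runs = 0
--         prev = -2
--         for i in idx:
--             if i != prev + 1:
--                 runs += 1
--             prev = i
--         last_seen = n - 1 - idx[-1] if idx else -1
--         at_end = 1 if idx and idx[-1] == n - 1 else 0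
--         out[d] = {'dz': d, 'freq': freq[d], 'lastSeen': last_seen,
--                   'runs': runs, 'impulso': 2 * len(idx) - 2 * runs + at_end}
--     return out
-- ===== Notes on version B (the rewrite author's own statement) =====
-- stated objective: faster
-- what changed: A makes 25 per-dozen re-scans of the whole history (plus a per-dozen backward scan and a 0/1 timeline per dozen); B builds per-dozen multiplicity counts and presence-index lists in a single pass over the history and then derives freq, lastSeen, runs and impulso for each dozen from its compact index list.
import Mathlib
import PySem

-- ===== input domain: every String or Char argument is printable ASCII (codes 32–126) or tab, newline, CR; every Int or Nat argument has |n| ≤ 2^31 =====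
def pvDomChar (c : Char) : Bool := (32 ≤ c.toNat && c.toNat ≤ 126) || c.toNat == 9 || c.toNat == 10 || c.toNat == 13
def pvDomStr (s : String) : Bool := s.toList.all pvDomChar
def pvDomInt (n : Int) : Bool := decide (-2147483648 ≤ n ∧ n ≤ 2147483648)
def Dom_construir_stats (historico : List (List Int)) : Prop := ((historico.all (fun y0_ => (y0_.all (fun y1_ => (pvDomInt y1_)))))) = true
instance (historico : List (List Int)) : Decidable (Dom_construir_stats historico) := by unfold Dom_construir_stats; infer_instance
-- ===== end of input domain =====

-- B replaces A's 25 full re-scans of historico by one indexing pass (per-dozen frequency and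
-- presence-index lists) plus a per-dozen pass over the compact index lists; objective: faster.

-- ===== PORT A =====
def pvR : List Int := PySem.List.pyRange 1 26 1

-- loop body of A's "runs and impulso" scan over enumerate(tl)
def aScanBody (tl : List Int) (acc : Int × Int × Int) (p : Int × Int) : Int × Int × Int :=
  let prev : Int := if p.1 > 0 then (PySem.List.pyGet? tl (p.1 - 1)).getD 0 else 0
  let imp1 := if p.2 = 1 ∧ prev = 0 then acc.2.2 + 1 else acc.2.2
  let imp2 := if p.2 = 0 ∧ prev = 1 then imp1 - 1 else imp1
  let imp3 := if p.2 = 1 ∧ prev = 1 then imp2 + 2 else imp2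
  if p.2 = 1 then (acc.1, acc.2.1 + 1, imp3)
  else if acc.2.1 > 0 then (acc.1 + 1, (0 : Int), imp3) else (acc.1, acc.2.1, imp3)

def construir_stats (historico : List (List Int)) : List (Int × List (String × Int)) :=
  let n : Int := (historico.length : Int)
  let stats0 : PySem.Dict Int (PySem.Dict String Int) :=
    PySem.Dict.ofList (pvR.map (fun d =>
      (d, PySem.Dict.ofList [("dz", d), ("freq", 0), ("lastSeen", -1), ("runs", 0), ("impulso", 0)])))
  let stats1 := (PySem.List.enumerate historico 0).foldl (fun st p =>
    p.2.foldl (fun st d =>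
      if 1 ≤ d ∧ d ≤ 25 then
        st.modify d (PySem.Dict.mk []) (fun inner => inner.modify "freq" 0 (· + 1))
      else st) st) stats0
  let stats2 := pvR.foldl (fun st d =>
    match (PySem.List.pyRange (n - 1) (-1) (-1)).find?
        (fun i => ((PySem.List.pyGet? historico i).getD []).contains d) with
    | some i => st.modify d (PySem.Dict.mk []) (fun inner => inner.insert "lastSeen" (n - 1 - i))
    | none => st) stats1
  let stats3 := pvR.foldl (fun st d =>
    let tl : List Int := historico.map (fun c => if c.contains d then (1 : Int) else 0)
    let r := (PySem.List.enumerate tl 0).foldl (aScanBody tl) ((0 : Int), (0 : Int), (0 : Int))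
    let runs := if r.2.1 > 0 then r.1 + 1 else r.1
    st.modify d (PySem.Dict.mk []) (fun inner =>
      (inner.insert "runs" runs).insert "impulso" r.2.2)) stats2
  stats3.items.map (fun p => (p.1, p.2.items))

-- ===== PORT B =====
-- loop body of B's single indexing pass: bump the multiplicity counter, and record the
-- concurso index once per dozen (dedup via the per-concurso 'seen' set)
def bBody (i : Int) (st : PySem.Dict Int Int × PySem.Dict Int (List Int) × PySem.Set Int) (d : Int) :
    PySem.Dict Int Int × PySem.Dict Int (List Int) × PySem.Set Int :=
  if 1 ≤ d ∧ d ≤ 25 then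
    let freq := st.1.modify d 0 (· + 1)
    if st.2.2.contains d then (freq, st.2.1, st.2.2)
    else (freq, st.2.1.modify d [] (· ++ [i]), st.2.2.add d)
  else st

def bOuter (st : PySem.Dict Int Int × PySem.Dict Int (List Int)) (p : Int × List Int) :
    PySem.Dict Int Int × PySem.Dict Int (List Int) :=
  let r := p.2.foldl (bBody p.1) (st.1, st.2, PySem.Set.empty)
  (r.1, r.2.1)

-- B's gap-counting loop over an index list: runs = number of maximal consecutive groups
def bRuns (idx : List Int) : Int × Int :=
  idx.foldl (fun acc i => (if i ≠ acc.2 + 1 then acc.1 + 1 else acc.1, i)) ((0 : Int), (-2 : Int))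

def construir_stats_alt (historico : List (List Int)) : List (Int × List (String × Int)) :=
  let n : Int := (historico.length : Int)
  let freq0 : PySem.Dict Int Int := PySem.Dict.ofList (pvR.map (fun d => (d, (0 : Int))))
  let pos0 : PySem.Dict Int (List Int) := PySem.Dict.ofList (pvR.map (fun d => (d, ([] : List Int))))
  let fp := (PySem.List.enumerate historico 0).foldl bOuter (freq0, pos0)
  let out := pvR.foldl (fun (out : PySem.Dict Int (PySem.Dict String Int)) d =>
      let idx := fp.2.getD d []
      let runs := (bRuns idx).1
      let lastSeen : Int := if idx.isEmpty then -1 else n - 1 - PySem.List.pyGetD idx (-1) 0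
      let atEnd : Int := if ¬ idx.isEmpty ∧ PySem.List.pyGetD idx (-1) 0 = n - 1 then 1 else 0
      out.insert d (PySem.Dict.ofList
        [("dz", d), ("freq", fp.1.getD d 0), ("lastSeen", lastSeen), ("runs", runs),
         ("impulso", 2 * (idx.length : Int) - 2 * runs + atEnd)]))
    PySem.Dict.empty
  out.items.map (fun p => (p.1, p.2.items))

-- ===== PRECONDITION & SPEC =====
def Spec_construir_stats (historico : List (List Int)) (out : List (Int × List (String × Int))) : Prop := out = construir_stats_alt historico
instance (historico : List (List Int)) (out : List (Int × List (String × Int))) : Decidable (Spec_construir_stats historico out) := by unfold Spec_construir_stats; infer_instance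

-- ===== CLAIM (what is proved, stated in full; the proofs are below) =====
def Claim_equal_construir_stats : Prop := ∀ (historico : List (List Int)), Dom_construir_stats historico → Spec_construir_stats historico (construir_stats historico)

-- ===== LEMMAS AND PROOFS =====

-- proof-side helpers --------------------------------------------------------

-- a dict over the fixed key list pvR whose value at d is f d
def SD {ν : Type} (f : Int → ν) : PySem.Dict Int ν := ⟨pvR.map (fun d => (d, f d))⟩

-- the inner per-dozen record with its five fields
def V (d f ls r m : Int) : PySem.Dict String Int :=
  ⟨[("dz", d), ("freq", f), ("lastSeen", ls), ("runs", r), ("impulso", m)]⟩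

def b2i (b : Bool) : Int := if b then 1 else 0

-- (runs incl. trailing open block, impulso) of a presence sequence given the previous value
def AS : Bool → List Bool → Int × Int
  | prev, [] => ((if prev then 1 else 0), 0)
  | prev, b :: rest =>
    ((AS b rest).1 + (if ¬b ∧ prev then 1 else 0),
     (AS b rest).2 + (if b ∧ ¬prev then 1 else 0) - (if ¬b ∧ prev then 1 else 0)
       + (if b ∧ prev then 2 else 0))

-- number of rises (false→true transitions)
def RS : Bool → List Bool → Int
  | _, [] => 0
  | prev, b :: rest => (if b ∧ ¬prev then 1 else 0) + RS b rest

-- indices (from k) at which the presence sequence is true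
def posF (k : Int) : List Bool → List Int
  | [] => []
  | b :: rest => (if b then [k] else []) ++ posF (k + 1) rest

-- index of the last true entry
def lastT : List Bool → Option Int
  | [] => none
  | b :: rest =>
    match lastT rest with
    | some j => some (j + 1)
    | none => if b then some (0 : Int) else none

def cntT : List Bool → Int
  | [] => 0
  | b :: rest => (if b then 1 else 0) + cntT rest

def bsOf (historico : List (List Int)) (d : Int) : List Bool := historico.map (fun c => c.contains d)

def cnt (historico : List (List Int)) (d : Int) : Nat := (historico.map (fun c => c.count d)).sum

def lsSpec (historico : List (List Int)) (d : Int) : Int :=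
  match lastT (bsOf historico d) with
  | some j => (historico.length : Int) - 1 - j
  | none => -1

def canon (historico : List (List Int)) : List (Int × List (String × Int)) :=
  pvR.map (fun d =>
    (d, [("dz", d), ("freq", (cnt historico d : Int)), ("lastSeen", lsSpec historico d),
         ("runs", (AS false (bsOf historico d)).1), ("impulso", (AS false (bsOf historico d)).2)]))

def gF : PySem.Dict String Int → PySem.Dict String Int := fun inner => inner.modify "freq" 0 (· + 1)

-- dict-shape and loop lemmas ----------------------------------------------

lemma mem_pvR (d : Int) : d ∈ pvR ↔ 1 ≤ d ∧ d ≤ 25 := by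
  unfold pvR; rw [PySem.List.mem_pyRange_one]; omega

lemma nodup_pvR : pvR.Nodup := PySem.List.nodup_pyRange_one 1 26

lemma find?_beq_self {l : List Int} {k : Int} (hk : k ∈ l) :
    l.find? (fun d => d == k) = some k := by
  induction l with
  | nil => cases hk
  | cons a t ih =>
    by_cases h : a = k
    · simp [List.find?, h]
    · have hkt : k ∈ t := by
        rcases List.mem_cons.mp hk with h' | h'
        · exact absurd h'.symm h
        · exact h'
      have hbeq : (a == k) = false := by simp [h]
      simp [List.find?, hbeq, ih hkt]

lemma get?_SD {ν : Type} (f : Int → ν) (k : Int) (hk : k ∈ pvR) :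
    (SD f).get? k = some (f k) := by
  unfold SD PySem.Dict.get?
  simp only [PySem.Dict.items, List.find?_map]
  have : ((fun p : Int × ν => p.1 == k) ∘ fun d => (d, f d)) = fun d => d == k := rfl
  rw [this, find?_beq_self hk]
  rfl

lemma getD_SD {ν : Type} (f : Int → ν) (k : Int) (dflt : ν) (hk : k ∈ pvR) :
    (SD f).getD k dflt = f k := by
  unfold PySem.Dict.getD; rw [get?_SD f k hk]; rfl

lemma keys_SD {ν : Type} (f : Int → ν) : (SD f).keys = pvR := by
  unfold SD
  rw [PySem.Dict.keys_mk, List.map_map]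
  have : ((fun x : Int × ν => x.1) ∘ fun d => (d, f d)) = id := rfl
  rw [this, List.map_id]

lemma contains_SD {ν : Type} (f : Int → ν) (k : Int) (hk : k ∈ pvR) :
    (SD f).contains k = true := by
  rw [PySem.Dict.contains_iff_mem_keys, keys_SD]; exact hk

lemma modify_SD {ν : Type} (f : Int → ν) (k : Int) (hk : k ∈ pvR) (dflt : ν) (g : ν → ν) :
    (SD f).modify k dflt g = SD (fun d => if d = k then g (f d) else f d) := by
  unfold PySem.Dict.modify
  rw [getD_SD f k dflt hk]
  apply PySem.Dict.ext
  rw [PySem.Dict.items_insert_of_contains _ _ (contains_SD f k hk)]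
  unfold SD
  dsimp only
  rw [List.map_map]
  apply List.map_congr_left
  intro d _
  by_cases h : d = k <;> simp [h]

lemma SD_congr {ν : Type} {f f' : Int → ν} (h : ∀ d ∈ pvR, f d = f' d) : SD f = SD f' := by
  apply PySem.Dict.ext
  unfold SD
  dsimp only
  apply List.map_congr_left
  intro d hd; rw [h d hd]

lemma ofList_SD {ν : Type} (f : Int → ν) :
    PySem.Dict.ofList (pvR.map (fun d => (d, f d))) = SD f := by
  apply PySem.Dict.ext
  unfold PySem.Dict.ofList PySem.Dict.update
  rw [show (fun (acc : PySem.Dict Int ν) (p : Int × ν) => acc.insert p.1 p.2)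
      = (fun (acc : PySem.Dict Int ν) (p : Int × ν) => acc.insert ((fun q : Int × ν => q.1) p) ((fun q : Int × ν => q.2) p)) from rfl,
    PySem.Dict.items_foldl_insert_fresh]
  · simp [SD, PySem.Dict.empty, Function.comp]
  · intro a _; exact PySem.Dict.contains_empty _
  · rw [List.map_map]; simpa using nodup_pvR

lemma ofList_V (d f ls r m : Int) :
    PySem.Dict.ofList [("dz", d), ("freq", f), ("lastSeen", ls), ("runs", r), ("impulso", m)]
      = V d f ls r m := by
  unfold PySem.Dict.ofList PySem.Dict.update V
  apply PySem.Dict.ext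
  rw [show (fun (acc : PySem.Dict String Int) (p : String × Int) => acc.insert p.1 p.2)
      = (fun (acc : PySem.Dict String Int) (p : String × Int) => acc.insert ((fun q : String × Int => q.1) p) ((fun q : String × Int => q.2) p)) from rfl,
    PySem.Dict.items_foldl_insert_fresh]
  · simp [PySem.Dict.empty]
  · intro a _; exact PySem.Dict.contains_empty _
  · simp

lemma foldR_update {ν : Type} (t : Int → ν → ν) (step : PySem.Dict Int ν → Int → PySem.Dict Int ν)
    (hstep : ∀ (f : Int → ν) (k : Int), k ∈ pvR →
      step (SD f) k = SD (fun d => if d = k then t k (f d) else f d)) :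
    ∀ (L : List Int) (f : Int → ν), L.Nodup → (∀ k ∈ L, k ∈ pvR) →
      L.foldl step (SD f) = SD (fun d => if d ∈ L then t d (f d) else f d) := by
  intro L
  induction L with
  | nil => intro f _ _; simp
  | cons k L ih =>
    intro f hnd hsub
    have hk : k ∈ pvR := hsub k (List.mem_cons_self ..)
    rw [List.foldl_cons, hstep f k hk,
      ih _ (List.nodup_cons.mp hnd).2 (fun a ha => hsub a (List.mem_cons_of_mem _ ha))]
    congr 1
    funext d
    by_cases hdk : d = k
    · subst hdk
      have : d ∉ L := (List.nodup_cons.mp hnd).1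
      simp [this]
    · by_cases hdL : d ∈ L <;> simp [hdk, hdL]

lemma gF_V (d f ls r m : Int) : gF (V d f ls r m) = V d (f + 1) ls r m := by
  unfold gF V PySem.Dict.modify PySem.Dict.getD PySem.Dict.get? PySem.Dict.insert PySem.Dict.contains
  simp [List.find?]

lemma gF_iter (n : Nat) (d f ls r m : Int) : gF^[n] (V d f ls r m) = V d (f + n) ls r m := by
  induction n generalizing f with
  | zero => simp
  | succ n ih =>
    rw [Function.iterate_succ_apply, gF_V, ih]
    congr 1
    push_cast
    ring

lemma insert_lastSeen_V (d f ls r m x : Int) :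
    (V d f ls r m).insert "lastSeen" x = V d f x r m := by
  unfold V PySem.Dict.insert PySem.Dict.contains
  simp

lemma insert_runs_V (d f ls r m x : Int) :
    (V d f ls r m).insert "runs" x = V d f ls x m := by
  unfold V PySem.Dict.insert PySem.Dict.contains
  simp

lemma insert_impulso_V (d f ls r m x : Int) :
    (V d f ls r m).insert "impulso" x = V d f ls r x := by
  unfold V PySem.Dict.insert PySem.Dict.contains
  simp

lemma concFoldA (conc : List Int) : ∀ (f : Int → PySem.Dict String Int),
    conc.foldl (fun st d =>
        if 1 ≤ d ∧ d ≤ 25 then st.modify d (PySem.Dict.mk []) (fun inner => inner.modify "freq" 0 (· + 1))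
        else st) (SD f)
      = SD (fun d => gF^[conc.count d] (f d)) := by
  induction conc with
  | nil => intro f; simp
  | cons d0 rest ih =>
    intro f
    rw [List.foldl_cons]
    by_cases hg : 1 ≤ d0 ∧ d0 ≤ 25
    · rw [if_pos hg, modify_SD f d0 ((mem_pvR d0).mpr hg), ih]
      congr 1
      funext d
      by_cases hd : d = d0
      · subst hd
        rw [if_pos rfl, show ((f d).modify "freq" 0 fun x => x + 1) = gF (f d) from rfl,
          ← Function.iterate_succ_apply]
        congr 1
        simp [List.count_cons]
      · rw [if_neg hd]
        have hd' : d0 ≠ d := fun h => hd h.symm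
        congr 1
        simp [List.count_cons, hd']
    · rw [if_neg hg, ih]
      apply SD_congr
      intro d hd
      have hdg := (mem_pvR d).mp hd
      have hd' : d0 ≠ d := by rintro rfl; exact hg hdg
      congr 1
      simp [List.count_cons, hd']

lemma histFoldA (historico : List (List Int)) :
    ∀ (s : Int) (f : Int → PySem.Dict String Int),
    (PySem.List.enumerate historico s).foldl (fun st p =>
        p.2.foldl (fun st d =>
          if 1 ≤ d ∧ d ≤ 25 then st.modify d (PySem.Dict.mk []) (fun inner => inner.modify "freq" 0 (· + 1))
          else st) st) (SD f)
      = SD (fun d => gF^[cnt historico d] (f d)) := by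
  induction historico with
  | nil => intro s f; simp [PySem.List.enumerate, cnt]
  | cons conc rest ih =>
    intro s f
    rw [PySem.List.enumerate_cons, List.foldl_cons]
    show (PySem.List.enumerate rest (s+1)).foldl _ (conc.foldl _ (SD f)) = _
    rw [concFoldA, ih]
    congr 1
    funext d
    rw [← Function.iterate_add_apply]
    congr 1
    simp [cnt, Nat.add_comm]

lemma lastT_snoc (bs : List Bool) (b : Bool) :
    lastT (bs ++ [b]) = if b then some ((bs.length : Int)) else lastT bs := by
  induction bs with
  | nil => cases b <;> simp [lastT]
  | cons b0 rest ih =>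
    cases b
    · have h : lastT (rest ++ [false]) = lastT rest := by rw [ih]; simp
      simp only [List.cons_append, lastT, h]
      simp
    · have h : lastT (rest ++ [true]) = some ((rest.length : Int)) := by rw [ih]; simp
      simp only [List.cons_append, lastT, h]
      push_cast
      simp

lemma find?_congr' {α : Type} (l : List α) (p q : α → Bool) (h : ∀ a ∈ l, p a = q a) :
    l.find? p = l.find? q := by
  induction l with
  | nil => rfl
  | cons a t ih =>
    rw [List.find?_cons, List.find?_cons, h a (List.mem_cons_self ..)]
    cases hq : q a
    · exact ih (fun x hx => h x (List.mem_cons_of_mem _ hx))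
    · rfl

lemma FL (d : Int) (historico : List (List Int)) :
    (PySem.List.pyRange ((historico.length : Int) - 1) (-1) (-1)).find?
        (fun i => ((PySem.List.pyGet? historico i).getD []).contains d)
      = lastT (bsOf historico d) := by
  induction historico using List.reverseRecOn with
  | nil => rw [PySem.List.pyRange_neg_one_eq_nil (by simp)]; rfl
  | append_singleton ys y ih =>
    have hlen : ((ys ++ [y]).length : Int) - 1 = (ys.length : Int) := by simp
    rw [hlen, PySem.List.pyRange_neg_one_cons (by omega), List.find?_cons]
    have hget : PySem.List.pyGet? (ys ++ [y]) ((ys.length : Int)) = some y := by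
      rw [PySem.List.pyGet?_natCast, List.getElem?_concat_length]
    have hbs : bsOf (ys ++ [y]) d = bsOf ys d ++ [y.contains d] := by simp [bsOf]
    rw [hget]
    cases hyc : y.contains d
    · simp only [Option.getD_some, hyc]
      have hcong : (PySem.List.pyRange ((ys.length : Int) - 1) (-1) (-1)).find?
            (fun i => ((PySem.List.pyGet? (ys ++ [y]) i).getD []).contains d)
          = (PySem.List.pyRange ((ys.length : Int) - 1) (-1) (-1)).find?
            (fun i => ((PySem.List.pyGet? ys i).getD []).contains d) := by
        apply find?_congr'
        intro i hi
        rw [PySem.List.mem_pyRange_neg_one] at hi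
        have h0 : 0 ≤ i := by omega
        obtain ⟨n, rfl⟩ := Int.eq_ofNat_of_zero_le h0
        have hn : n < ys.length := by omega
        rw [PySem.List.pyGet?_natCast, PySem.List.pyGet?_natCast, List.getElem?_append_left hn]
      have hmem : d ∉ y := by simpa using hyc
      rw [hcong, ih, hbs, lastT_snoc]
      simp [hmem]
    · simp only [Option.getD_some, hyc]
      rw [hbs, lastT_snoc, hyc]
      simp [bsOf]

lemma aScan_go (bs : List Bool) :
    ∀ (suf pre : List Bool), bs = pre ++ suf → ∀ (r c m : Int), 0 ≤ c →
      (0 < c ↔ pre.getLastD false = true) →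
      (let acc := (PySem.List.enumerate (suf.map b2i) ((pre.length : Int))).foldl
          (aScanBody (bs.map b2i)) (r, c, m)
       ((if acc.2.1 > 0 then acc.1 + 1 else acc.1), acc.2.2))
        = (r + (AS (pre.getLastD false) suf).1, m + (AS (pre.getLastD false) suf).2) := by
  intro suf
  induction suf with
  | nil =>
    intro pre hsplit r c m hcnn hc
    simp only [List.map_nil, PySem.List.enumerate, List.foldl_nil, AS]
    by_cases h : 0 < c
    · rw [if_pos h, if_pos ((hc.mp h))]
      simp
    · rw [if_neg h]
      have : pre.getLastD false = false := by
        cases hgl : pre.getLastD false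
        · rfl
        · exact absurd (hc.mpr hgl) h
      rw [this]
      simp
  | cons b rest ih =>
    intro pre hsplit r c m hcnn hc
    simp only [List.map_cons, PySem.List.enumerate_cons, List.foldl_cons]
    -- evaluate the body on the head element
    have hprev : (if ((pre.length : Int)) > 0
        then (PySem.List.pyGet? (bs.map b2i) ((pre.length : Int) - 1)).getD 0 else 0)
        = b2i (pre.getLastD false) := by
      cases pre with
      | nil => simp [b2i]
      | cons p0 ps =>
        have hpos : ((p0 :: ps).length : Int) > 0 := by simp
        rw [if_pos hpos]
        have hne : (p0 :: ps) ≠ [] := by simp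
        have hlt : (p0 :: ps).length - 1 < (p0 :: ps).length := by simp
        have hcast : ((p0 :: ps).length : Int) - 1 = (((p0 :: ps).length - 1 : Nat) : Int) := by
          simp
        rw [hcast, PySem.List.pyGet?_natCast]
        rw [hsplit]
        have hlt2 : (p0 :: ps).length - 1 < ((p0 :: ps).map b2i).length := by simp
        rw [show ((p0 :: ps) ++ b :: rest).map b2i = (p0 :: ps).map b2i ++ (b :: rest).map b2i by simp,
          List.getElem?_append_left hlt2]
        rw [List.getElem?_eq_getElem (by simp)]
        simp only [Option.getD_some]
        rw [List.getElem_map]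
        congr 1
        rw [List.getLastD_eq_getLast?, List.getLast?_eq_some_getLast hne]
        simp only [Option.getD_some]
        exact (List.getLast_eq_getElem hne).symm
    have hlast : ∀ bb : Bool, (pre ++ [bb]).getLastD false = bb := by
      intro bb
      rw [List.getLastD_eq_getLast?, List.getLast?_append]
      simp
    have hlen : ∀ bb : Bool, (((pre ++ [bb]).length : Int)) = (pre.length : Int) + 1 := by
      intro bb; simp
    cases hb : b <;> rw [hb] at hsplit <;> cases hpb : pre.getLastD false <;> rw [hpb] at hc hprev
    · -- b = false, pb = false : state unchanged
      have hc0 : c = 0 := by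
        rcases lt_or_eq_of_le hcnn with h | h
        · exact absurd (hc.mp h) (by simp)
        · omega
      have hbody : aScanBody (bs.map b2i) (r, c, m) ((pre.length : Int), b2i false) = (r, c, m) := by
        unfold aScanBody
        dsimp only
        rw [hprev]
        simp [b2i, hc0]
      rw [hbody]
      have := ih (pre ++ [false]) (by simpa using hsplit) r c m hcnn
        (by rw [hlast false]; simp [hc0])
      rw [hlen false] at this
      rw [this, hlast false]
      simp only [AS, hpb]
      rw [Prod.ext_iff]
      refine ⟨?_, ?_⟩ <;> simp <;> ring_nf
    · -- b = false, pb = true : fall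
      have hcpos : 0 < c := hc.mpr rfl
      have hbody : aScanBody (bs.map b2i) (r, c, m) ((pre.length : Int), b2i false)
          = (r + 1, 0, m - 1) := by
        unfold aScanBody
        dsimp only
        rw [hprev]
        simp [b2i, hcpos]
      rw [hbody]
      have := ih (pre ++ [false]) (by simpa using hsplit) (r + 1) 0 (m - 1) le_rfl
        (by rw [hlast false]; simp)
      rw [hlen false] at this
      rw [this, hlast false]
      simp only [AS, hpb]
      rw [Prod.ext_iff]
      refine ⟨?_, ?_⟩ <;> simp <;> ring_nf
    · -- b = true, pb = false : rise
      have hc0 : c = 0 := by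
        rcases lt_or_eq_of_le hcnn with h | h
        · exact absurd (hc.mp h) (by simp)
        · omega
      have hbody : aScanBody (bs.map b2i) (r, c, m) ((pre.length : Int), b2i true)
          = (r, c + 1, m + 1) := by
        unfold aScanBody
        dsimp only
        rw [hprev]
        simp [b2i]
      rw [hbody]
      have := ih (pre ++ [true]) (by simpa using hsplit) r (c + 1) (m + 1) (by omega)
        (by rw [hlast true]; constructor <;> intro <;> simp <;> omega)
      rw [hlen true] at this
      rw [this, hlast true]
      simp only [AS, hpb]
      rw [Prod.ext_iff]
      refine ⟨?_, ?_⟩ <;> simp <;> ring_nf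
    · -- b = true, pb = true : stay
      have hcpos : 0 < c := hc.mpr rfl
      have hbody : aScanBody (bs.map b2i) (r, c, m) ((pre.length : Int), b2i true)
          = (r, c + 1, m + 2) := by
        unfold aScanBody
        dsimp only
        rw [hprev]
        simp [b2i]
      rw [hbody]
      have := ih (pre ++ [true]) (by simpa using hsplit) r (c + 1) (m + 2) (by omega)
        (by rw [hlast true]; constructor <;> intro <;> simp <;> omega)
      rw [hlen true] at this
      rw [this, hlast true]
      simp only [AS, hpb]
      rw [Prod.ext_iff]
      refine ⟨?_, ?_⟩ <;> simp <;> ring_nf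

lemma concFoldB (conc : List Int) :
    ∀ (i : Int) (φ : Int → Int) (π : Int → List Int) (seen : PySem.Set Int),
    conc.foldl (bBody i) (SD φ, SD π, seen)
      = (SD (fun d => φ d + (if 1 ≤ d ∧ d ≤ 25 then (conc.count d : Int) else 0)),
         SD (fun d => π d ++ (if 1 ≤ d ∧ d ≤ 25 ∧ d ∈ conc ∧ ¬ (seen.contains d = true) then [i] else [])),
         PySem.Set.update seen (conc.filter (fun d => decide (1 ≤ d ∧ d ≤ 25)))) := by
  induction conc with
  | nil =>
    intro i φ π seen
    simp only [List.foldl_nil, List.count_nil, List.filter_nil, PySem.Set.update]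
    simp only [Prod.mk.injEq]
    refine ⟨?_, ?_, trivial⟩
    · apply SD_congr; intro d _; simp
    · apply SD_congr; intro d _; simp
  | cons d0 rest ih =>
    intro i φ π seen
    rw [List.foldl_cons]
    by_cases hg : 1 ≤ d0 ∧ d0 ≤ 25
    · have hd0R : d0 ∈ pvR := (mem_pvR d0).mpr hg
      by_cases hseen : seen.contains d0 = true
      · have hb : bBody i (SD φ, SD π, seen) d0
            = (SD (fun d => if d = d0 then φ d + 1 else φ d), SD π, seen) := by
          unfold bBody
          rw [if_pos hg]
          dsimp only
          rw [if_pos hseen, modify_SD φ d0 hd0R]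
        have hadd : seen.add d0 = seen := by
          have hm : d0 ∈ seen := by simpa using hseen
          simp [PySem.Set.add, hm]
        rw [hb, ih]
        simp only [Prod.mk.injEq]
        refine ⟨?_, ?_, ?_⟩
        · apply SD_congr; intro d _
          by_cases hd : d = d0
          · subst hd; simp [List.count_cons, hg]; push_cast; ring
          · have hd' : d0 ≠ d := fun h => hd h.symm
            simp [List.count_cons, hd', hd]
        · apply SD_congr; intro d _
          by_cases hd : d = d0
          · subst hd
            have hm : d ∈ seen := by simpa using hseen
            simp [hm]
          · have : (d ∈ d0 :: rest ∧ ¬seen.contains d = true) ↔ (d ∈ rest ∧ ¬seen.contains d = true) := by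
              constructor
              · rintro ⟨hm, hs⟩
                rcases List.mem_cons.mp hm with h | h
                · exact absurd h hd
                · exact ⟨h, hs⟩
              · rintro ⟨hm, hs⟩; exact ⟨List.mem_cons_of_mem _ hm, hs⟩
            simp only [this]
        · rw [List.filter_cons, if_pos (by simpa using hg)]
          simp only [PySem.Set.update, List.foldl_cons, hadd]
      · have hb : bBody i (SD φ, SD π, seen) d0
            = (SD (fun d => if d = d0 then φ d + 1 else φ d),
               SD (fun d => if d = d0 then π d ++ [i] else π d), seen.add d0) := by
          unfold bBody
          rw [if_pos hg]
          dsimp only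
          rw [if_neg hseen, modify_SD φ d0 hd0R, modify_SD π d0 hd0R]
        rw [hb, ih]
        simp only [Prod.mk.injEq]
        refine ⟨?_, ?_, ?_⟩
        · apply SD_congr; intro d _
          by_cases hd : d = d0
          · subst hd; simp [List.count_cons, hg]; push_cast; ring
          · have hd' : d0 ≠ d := fun h => hd h.symm
            simp [List.count_cons, hd', hd]
        · apply SD_congr; intro d _
          have hca : ((seen.add d0).contains d = true) ↔ (d ∈ seen ∨ d = d0) := by
            constructor
            · intro h; exact (PySem.Set.mem_add seen d0 d).mp (by simpa using h)
            · intro h; simpa using (PySem.Set.mem_add seen d0 d).mpr h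
          by_cases hd : d = d0
          · subst hd
            have hsm : ¬ (d ∈ seen) := fun h => hseen (by simpa using h)
            simp [hg, hsm, hca]
          · have : ((seen.add d0).contains d = true) ↔ (seen.contains d = true) := by
              rw [hca]
              constructor
              · rintro (h | h)
                · simpa using h
                · exact absurd h hd
              · intro h; exact Or.inl (by simpa using h)
            simp only [this]
            by_cases hmem : d ∈ rest
            · have : d ∈ d0 :: rest := List.mem_cons_of_mem _ hmem
              simp [hmem, this, hd]
            · have : ¬ (d ∈ d0 :: rest) := by
                intro h
                rcases List.mem_cons.mp h with h | h
                · exact hd h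
                · exact hmem h
              simp [hmem, this, hd]
        · rw [List.filter_cons, if_pos (by simpa using hg)]
          simp only [PySem.Set.update, List.foldl_cons]
    · have hb : bBody i (SD φ, SD π, seen) d0 = (SD φ, SD π, seen) := by
        unfold bBody
        rw [if_neg hg]
      rw [hb, ih]
      have hd0R : d0 ∉ pvR := fun h => hg ((mem_pvR d0).mp h)
      simp only [Prod.mk.injEq]
      refine ⟨?_, ?_, ?_⟩
      · apply SD_congr; intro d hd
        have hd' : d0 ≠ d := by rintro rfl; exact hd0R hd
        simp [List.count_cons, hd']
      · apply SD_congr; intro d hd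
        have hd' : d ≠ d0 := by rintro rfl; exact hd0R hd
        by_cases hmem : d ∈ rest
        · have : d ∈ d0 :: rest := List.mem_cons_of_mem _ hmem
          simp [hmem, this]
        · have : ¬ (d ∈ d0 :: rest) := by
            intro h
            rcases List.mem_cons.mp h with h | h
            · exact hd' h
            · exact hmem h
          simp [hmem, this]
      · rw [List.filter_cons, if_neg (by simpa using hg)]

lemma histFoldB (historico : List (List Int)) :
    ∀ (k : Int) (φ : Int → Int) (π : Int → List Int),
    (PySem.List.enumerate historico k).foldl bOuter (SD φ, SD π)
      = (SD (fun d => φ d + (if 1 ≤ d ∧ d ≤ 25 then (cnt historico d : Int) else 0)),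
         SD (fun d => π d ++ (if 1 ≤ d ∧ d ≤ 25 then posF k (bsOf historico d) else []))) := by
  induction historico with
  | nil =>
    intro k φ π
    simp only [PySem.List.enumerate, List.foldl_nil, cnt, bsOf, List.map_nil, List.sum_nil]
    simp only [Prod.mk.injEq]
    constructor
    · apply SD_congr; intro d _; simp
    · apply SD_congr; intro d _; simp [posF]
  | cons conc rest ih =>
    intro k φ π
    rw [PySem.List.enumerate_cons, List.foldl_cons]
    have hstep : bOuter (SD φ, SD π) (k, conc)
        = (SD (fun d => φ d + (if 1 ≤ d ∧ d ≤ 25 then (conc.count d : Int) else 0)),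
           SD (fun d => π d ++ (if 1 ≤ d ∧ d ≤ 25 ∧ d ∈ conc then [k] else []))) := by
      unfold bOuter
      dsimp only
      rw [concFoldB]
      simp only [Prod.mk.injEq]
      constructor
      · trivial
      · apply SD_congr; intro d _
        have : PySem.Set.empty.contains d = false := by simp [PySem.Set.empty, PySem.Set.contains]
        simp [this]
    rw [hstep, ih]
    simp only [Prod.mk.injEq]
    constructor
    · apply SD_congr; intro d _
      by_cases hg : 1 ≤ d ∧ d ≤ 25
      · simp only [if_pos hg, cnt, List.map_cons, List.sum_cons]
        push_cast
        ring
      · simp [hg]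
    · apply SD_congr; intro d _
      by_cases hg : 1 ≤ d ∧ d ≤ 25
      · have hbs : bsOf (conc :: rest) d = (conc.contains d) :: bsOf rest d := by simp [bsOf]
        rw [hbs]
        simp only [posF, if_pos hg, List.append_assoc]
        congr 1
        by_cases hmem : d ∈ conc
        · simp [hmem, hg]
        · simp [hmem, hg]
      · have h3 : ¬(1 ≤ d ∧ d ≤ 25 ∧ d ∈ conc) := fun h => hg ⟨h.1, h.2.1⟩
        simp [hg, h3]

lemma bRuns_go (bs : List Bool) :
    ∀ (k prevIdx r : Int) (pv : Bool), prevIdx < k →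
      (pv = true → prevIdx = k - 1) → (pv = false → prevIdx + 1 ≠ k) →
      ((posF k bs).foldl (fun acc i => (if i ≠ acc.2 + 1 then acc.1 + 1 else acc.1, i)) (r, prevIdx)).1
        = r + RS pv bs := by
  induction bs with
  | nil => intro k prevIdx r pv _ _ _; simp [posF, RS]
  | cons b rest ih =>
    intro k prevIdx r pv hlt ht hf
    cases b
    · simp only [posF, Bool.false_eq_true, if_false, List.nil_append]
      rw [ih (k + 1) prevIdx r false (by omega) (by simp) (by intro _; omega)]
      simp [RS]
    · simp only [posF, if_pos rfl, List.singleton_append, List.foldl_cons]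
      have hstep : (if k ≠ prevIdx + 1 then r + 1 else r) = r + (if ¬(pv = true) then 1 else 0) := by
        cases pv
        · rw [if_pos (fun h => hf rfl (by omega))]
          simp
        · rw [if_neg (by have := ht rfl; omega)]
          simp
      show ((posF (k+1) rest).foldl _ ((if k ≠ prevIdx + 1 then r + 1 else r), k)).1 = _
      rw [hstep, ih (k + 1) k _ true (by omega) (fun _ => by omega) (by simp)]
      simp only [RS]
      cases pv <;> simp <;> ring

lemma AS1_eq_RS (bs : List Bool) : ∀ pv, (AS pv bs).1 = RS pv bs + (if pv then 1 else 0) := by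
  induction bs with
  | nil => intro pv; simp [AS, RS]
  | cons b rest ih =>
    intro pv
    simp only [AS, RS, ih b]
    cases b <;> cases pv <;> simp <;> ring

lemma AS2_closed (bs : List Bool) :
    ∀ pv, (AS pv bs).2 = 2 * cntT bs - 2 * RS pv bs
      + (if bs.getLastD pv then 1 else 0) - (if pv then 1 else 0) := by
  induction bs with
  | nil => intro pv; simp [AS, RS, cntT]
  | cons b rest ih =>
    intro pv
    simp only [AS, RS, cntT, ih b, List.getLastD_cons]
    cases b <;> cases pv <;> simp <;> ring

lemma cntT_posF (bs : List Bool) : ∀ k, ((posF k bs).length : Int) = cntT bs := by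
  induction bs with
  | nil => intro k; simp [posF, cntT]
  | cons b rest ih =>
    intro k
    simp only [posF, cntT, List.length_append]
    rw [show (((if b then [k] else []).length + (posF (k+1) rest).length : Nat) : Int)
      = ((if b then [k] else []).length : Int) + ((posF (k+1) rest).length : Int) by push_cast; ring]
    rw [ih (k+1)]
    cases b <;> simp

lemma getLast?_posF (bs : List Bool) :
    ∀ k, (posF k bs).getLast? = (lastT bs).map (fun j => k + j) := by
  induction bs with
  | nil => intro k; simp [posF, lastT]
  | cons b rest ih =>
    intro k
    simp only [posF, lastT]
    cases hl : lastT rest with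
    | none =>
      have hnil : posF (k+1) rest = [] := by
        have := ih (k+1)
        rw [hl] at this
        simpa using List.getLast?_eq_none_iff.mp (by simpa using this)
      rw [hnil]
      cases b <;> simp
    | some j =>
      have hne : posF (k+1) rest ≠ [] := by
        intro h
        have := ih (k+1)
        rw [hl, h] at this
        simp at this
      rw [List.getLast?_append]
      have h2 := ih (k+1)
      rw [hl] at h2
      rw [h2]
      simp only [Option.map_some, Option.some_or]
      congr 1
      ring

lemma lastT_none_iff (bs : List Bool) : lastT bs = none ↔ ∀ b ∈ bs, b = false := by
  induction bs with
  | nil => simp [lastT]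
  | cons b rest ih =>
    simp only [lastT]
    cases hl : lastT rest with
    | some j => simp only [List.mem_cons]
                constructor
                · intro h; cases h
                · intro h
                  have : ∀ x ∈ rest, x = false := fun x hx => h x (Or.inr hx)
                  rw [ih.mpr this] at hl; cases hl
    | none =>
      cases b
      · constructor
        · intro _ x hx
          rcases List.mem_cons.mp hx with h | h
          · rw [h]
          · exact (ih.mp hl) x h
        · intro _; rfl
      · constructor
        · intro h; cases h
        · intro h; exact absurd (h true (List.mem_cons_self ..)) (by simp)

lemma allfalse_getLastD (bs : List Bool) : ∀ dft, (∀ b ∈ bs, b = false) →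
    bs.getLastD dft = (if bs.isEmpty then dft else false) := by
  induction bs with
  | nil => intro dft _; simp
  | cons b rest ih =>
    intro dft h
    rw [List.getLastD_cons, ih b (fun x hx => h x (List.mem_cons_of_mem _ hx))]
    cases hr : rest.isEmpty
    · simp
    · simp only [if_pos rfl]
      simp [h b (List.mem_cons_self ..)]

lemma getLastD_true_iff_lastT (bs : List Bool) :
    bs.getLastD false = true ↔ lastT bs = some ((bs.length : Int) - 1) := by
  induction bs with
  | nil => simp [lastT]
  | cons b rest ih =>
    rw [List.getLastD_cons]
    by_cases hrest : rest = []
    · subst hrest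
      cases b <;> simp [lastT]
    · have hgd : rest.getLastD b = rest.getLastD false := by
        rw [List.getLastD_eq_getLast?, List.getLastD_eq_getLast?,
          List.getLast?_eq_some_getLast hrest]
        rfl
      rw [hgd]
      simp only [lastT]
      cases hl : lastT rest with
      | some j =>
        rw [ih] at *
        rw [hl]
        simp only [Option.some.injEq] at *
        have hlen : ((b :: rest).length : Int) = (rest.length : Int) + 1 := by simp
        rw [hlen]
        constructor <;> intro h <;> omega
      | none =>
        have hall := (lastT_none_iff rest).mp hl
        have hfalse : rest.getLastD false = false := by
          rw [allfalse_getLastD rest false hall]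
          simp [List.isEmpty_iff, hrest]
        rw [hfalse]
        have hlenpos : rest.length ≠ 0 := by simpa [List.length_eq_zero_iff] using hrest
        cases b
        · simp
        · constructor
          · intro h; cases h
          · intro h
            exfalso
            have hlen : ((true :: rest).length : Int) - 1 = (rest.length : Int) := by
              push_cast [List.length_cons]; ring
            rw [hlen] at h
            simp only [reduceIte, Option.some.injEq] at h
            have : (rest.length : Int) ≠ 0 := by exact_mod_cast hlenpos
            omega

-- main characterizations -----------------------------------------------------

-- the effective per-dozen update of A's lastSeen phase
def t2f (historico : List (List Int)) (k : Int) : PySem.Dict String Int → PySem.Dict String Int :=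
  fun inner =>
    match (PySem.List.pyRange ((historico.length : Int) - 1) (-1) (-1)).find?
        (fun i => ((PySem.List.pyGet? historico i).getD []).contains k) with
    | some i => inner.insert "lastSeen" ((historico.length : Int) - 1 - i)
    | none => inner

-- the effective per-dozen update of A's runs/impulso phase
def t3f (historico : List (List Int)) (k : Int) : PySem.Dict String Int → PySem.Dict String Int :=
  fun inner =>
    let tl : List Int := historico.map (fun c => if c.contains k then (1 : Int) else 0)
    let r := (PySem.List.enumerate tl 0).foldl (aScanBody tl) ((0 : Int), (0 : Int), (0 : Int))
    (inner.insert "runs" (if r.2.1 > 0 then r.1 + 1 else r.1)).insert "impulso" r.2.2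

lemma aScan_result (historico : List (List Int)) (d : Int) :
    (let tl : List Int := historico.map (fun c => if c.contains d then (1 : Int) else 0)
     let r := (PySem.List.enumerate tl 0).foldl (aScanBody tl) ((0 : Int), (0 : Int), (0 : Int))
     ((if r.2.1 > 0 then r.1 + 1 else r.1), r.2.2))
      = ((AS false (bsOf historico d)).1, (AS false (bsOf historico d)).2) := by
  have htl : historico.map (fun c => if c.contains d then (1 : Int) else 0)
      = (bsOf historico d).map b2i := by
    simp [bsOf, b2i, List.map_map]
  dsimp only
  rw [htl]
  have hgo := aScan_go (bsOf historico d) (bsOf historico d) [] rfl 0 0 0 le_rfl (by simp)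
  simpa using hgo

lemma A_eq_canon (historico : List (List Int)) : construir_stats historico = canon historico := by
  unfold construir_stats
  simp only []
  -- stats0 is the SD of the initial records
  have h0 : (pvR.map (fun d =>
        (d, PySem.Dict.ofList [("dz", d), ("freq", (0 : Int)), ("lastSeen", (-1 : Int)),
          ("runs", (0 : Int)), ("impulso", (0 : Int))])))
      = pvR.map (fun d => (d, V d 0 (-1) 0 0)) :=
    List.map_congr_left (fun d _ => by rw [ofList_V])
  rw [h0, ofList_SD, histFoldA]
  have h1 : SD (fun d => gF^[cnt historico d] (V d 0 (-1) 0 0))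
      = SD (fun d => V d ((cnt historico d : Int)) (-1) 0 0) := by
    apply congrArg
    funext d
    rw [gF_iter]
    norm_num
  rw [h1]
  -- lastSeen phase
  rw [foldR_update (t2f historico) _ ?hstep2 pvR _ nodup_pvR (fun k hk => hk)]
  case hstep2 =>
    intro f k hk
    dsimp only
    cases hfind : (PySem.List.pyRange ((historico.length : Int) - 1) (-1) (-1)).find?
        (fun i => ((PySem.List.pyGet? historico i).getD []).contains k) with
    | none =>
      show SD f = _
      apply congrArg
      funext d
      by_cases hd : d = k
      · subst hd
        simp only [t2f]
        rw [hfind]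
        simp
      · simp [hd]
    | some i =>
      show (SD f).modify k (PySem.Dict.mk []) _ = _
      rw [modify_SD f k hk]
      apply congrArg
      funext d
      by_cases hd : d = k
      · subst hd
        simp only [t2f]
        rw [hfind]
      · simp [hd]
  -- runs/impulso phase
  rw [foldR_update (t3f historico) _ ?hstep3 pvR _ nodup_pvR (fun k hk => hk)]
  case hstep3 =>
    intro f k hk
    dsimp only
    rw [modify_SD f k hk]
    rfl
  -- final items
  unfold canon SD
  dsimp only
  rw [List.map_map]
  apply List.map_congr_left
  intro d hd
  simp only [Function.comp_apply, if_pos hd]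
  congr 1
  -- compute the record for d
  have hgo := aScan_result historico d
  dsimp only at hgo
  unfold t3f
  dsimp only
  cases hl : lastT (bsOf historico d) with
  | none =>
    have hfind : (PySem.List.pyRange ((historico.length : Int) - 1) (-1) (-1)).find?
        (fun i => ((PySem.List.pyGet? historico i).getD []).contains d) = none := by
      rw [FL d historico, hl]
    unfold t2f
    rw [hfind]
    simp only []
    rw [Prod.ext_iff] at hgo
    simp only at hgo
    rw [hgo.1, hgo.2, insert_runs_V, insert_impulso_V]
    unfold lsSpec
    rw [hl]
    rfl
  | some j =>
    have hfind : (PySem.List.pyRange ((historico.length : Int) - 1) (-1) (-1)).find?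
        (fun i => ((PySem.List.pyGet? historico i).getD []).contains d) = some j := by
      rw [FL d historico, hl]
    unfold t2f
    rw [hfind]
    simp only []
    rw [insert_lastSeen_V]
    rw [Prod.ext_iff] at hgo
    simp only at hgo
    rw [hgo.1, hgo.2, insert_runs_V, insert_impulso_V]
    unfold lsSpec
    rw [hl]
    rfl

lemma B_eq_canon (historico : List (List Int)) : construir_stats_alt historico = canon historico := by
  unfold construir_stats_alt
  simp only []
  rw [ofList_SD (fun _ => (0 : Int)), ofList_SD (fun _ => ([] : List Int)), histFoldB]
  rw [PySem.Dict.items_foldl_insert_fresh pvR (fun d => d) _ PySem.Dict.empty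
    (fun a _ => PySem.Dict.contains_empty _) (by simpa using nodup_pvR)]
  rw [show PySem.Dict.empty.items = ([] : List (Int × PySem.Dict String Int)) from rfl,
    List.nil_append, List.map_map]
  unfold canon
  apply List.map_congr_left
  intro d hd
  have hguard := (mem_pvR d).mp hd
  simp only [Function.comp_apply, ofList_V, getD_SD _ d _ hd, if_pos hguard, zero_add,
    List.nil_append]
  congr 1
  -- now the five record fields
  show [("dz", d), ("freq", ((cnt historico d : Int))), _, _, _] = _
  have hrun : (bRuns (posF 0 (bsOf historico d))).1 = RS false (bsOf historico d) := by
    unfold bRuns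
    rw [bRuns_go (bsOf historico d) 0 (-2) 0 false (by omega) (by simp) (by intro _; omega)]
    ring
  have hAS1 : (AS false (bsOf historico d)).1 = RS false (bsOf historico d) := by
    rw [AS1_eq_RS]
    simp
  have hAS2 : (AS false (bsOf historico d)).2
      = 2 * cntT (bsOf historico d) - 2 * RS false (bsOf historico d)
        + (if (bsOf historico d).getLastD false then 1 else 0) := by
    rw [AS2_closed]
    simp
  have hlenbs : ((bsOf historico d).length : Int) = (historico.length : Int) := by
    simp [bsOf]
  cases hl : lastT (bsOf historico d) with
  | none =>
    have hnil : posF 0 (bsOf historico d) = [] := by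
      have := getLast?_posF (bsOf historico d) 0
      rw [hl] at this
      exact List.getLast?_eq_none_iff.mp (by simpa using this)
    have hgl : (bsOf historico d).getLastD false = false := by
      rw [allfalse_getLastD _ false ((lastT_none_iff _).mp hl)]
      cases h : (bsOf historico d).isEmpty <;> simp
    have hcnt0 : cntT (bsOf historico d) = 0 := by
      rw [← cntT_posF _ 0, hnil]
      simp
    rw [hrun, hAS1, hAS2, hgl, hnil, hcnt0]
    simp
    simp [lsSpec, hl]
  | some j =>
    have hlast : (posF 0 (bsOf historico d)).getLast? = some j := by
      rw [getLast?_posF, hl]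
      simp
    have hne : posF 0 (bsOf historico d) ≠ [] := by
      intro h
      rw [h] at hlast
      simp at hlast
    have hgetlast : PySem.List.pyGetD (posF 0 (bsOf historico d)) (-1) 0 = j := by
      rw [PySem.List.pyGetD_neg_one _ _ hne]
      have h2 := List.getLast?_eq_some_getLast hne
      rw [hlast] at h2
      injection h2 with h3
      exact h3.symm
    have hie : (posF 0 (bsOf historico d)).isEmpty = false := by
      simp [List.isEmpty_iff, hne]
    have hgd : ((bsOf historico d).getLastD false = true) ↔ (j = (historico.length : Int) - 1) := by
      rw [getLastD_true_iff_lastT, hl, hlenbs]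
      simp
    have hcnt : ((posF 0 (bsOf historico d)).length : Int) = cntT (bsOf historico d) :=
      cntT_posF _ 0
    rw [hrun, hAS1, hAS2, hgetlast, hie, hcnt]
    by_cases hj : j = (historico.length : Int) - 1
    · rw [if_pos (hgd.mpr hj)]
      simp [hj]
      simp [lsSpec, hl, hj]
    · rw [if_neg (fun h => hj (hgd.mp h))]
      simp [hj]
      simp [lsSpec, hl]

-- ===== VERDICT (by name: the statement is the Claim_ definition above) =====
theorem construir_stats_spec : Claim_equal_construir_stats := by
  intro historico _
  unfold Spec_construir_stats
  rw [A_eq_canon, B_eq_canon]
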